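-- pv_equiv track=rewrite | github.com/harshitrathor3/Data-Structures-in-Python | Recursion 1/lastIndexofNum.py | find1
-- ===== SOURCE A (Python) =====
-- def find1(arr, x):
--     if len(arr)<1:
--         return -1
--     if arr[-1]==x:
--         return 1
--     else:
--         ans = find1(arr[:-1], x)
--         if ans==-1:
--             return -1
--         else:
--             return ans+1
-- ===== SOURCE B (Python) =====
-- def find1(arr, x):
--     last = -1
--     for i, v in enumerate(arr):
--         if v == x:
--             last = i
--     if last == -1:
--         return -1
--     return len(arr) - last
-- ===== Notes on version B (the rewrite author's own statement) =====
-- stated objective: faster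
-- what changed: Replaces the back-to-front peeling recursion (slicing arr[:-1] each step and counting +1 from the end) with a single forward scan that records the index of the last match and derives the distance as len(arr) - last.
import Mathlib
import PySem

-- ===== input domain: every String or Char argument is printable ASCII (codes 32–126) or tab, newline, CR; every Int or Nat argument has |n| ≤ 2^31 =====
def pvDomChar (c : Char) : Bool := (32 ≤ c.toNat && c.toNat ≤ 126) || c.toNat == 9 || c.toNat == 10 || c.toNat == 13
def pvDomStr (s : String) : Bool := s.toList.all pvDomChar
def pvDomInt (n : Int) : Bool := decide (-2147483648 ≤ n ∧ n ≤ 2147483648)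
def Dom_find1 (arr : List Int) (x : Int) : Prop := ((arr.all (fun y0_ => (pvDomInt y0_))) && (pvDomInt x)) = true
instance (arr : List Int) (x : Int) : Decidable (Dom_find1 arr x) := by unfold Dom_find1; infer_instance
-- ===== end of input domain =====

-- B replaces A's back-to-front peeling recursion with one forward scan recording the last matching index; same values everywhere (simpler, O(n) vs A's O(n^2) slicing).

-- ===== PORT A =====
-- arr[-1] is read with pyGetD: exact here, since it is only evaluated under the guard len(arr) >= 1
def find1 (arr : List Int) (x : Int) : Int :=
  if arr.length < 1 then -1
  else if PySem.List.pyGetD arr (-1) 0 = x then 1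
  else
    let ans := find1 (PySem.List.slice arr none (some (-1))) x
    if ans = -1 then -1 else ans + 1
termination_by arr.length
decreasing_by
  simp only [PySem.List.slice_to_neg_one, List.length_dropLast]
  omega

-- ===== PORT B =====
def find1_alt (arr : List Int) (x : Int) : Int :=
  let last := (PySem.List.enumerate arr).foldl
    (fun acc p => if p.2 = x then p.1 else acc) (-1)
  if last = -1 then -1 else (arr.length : Int) - last

-- ===== PRECONDITION & SPEC =====
def Spec_find1 (arr : List Int) (x : Int) (out : Int) : Prop := out = find1_alt arr x
instance (arr : List Int) (x : Int) (out : Int) : Decidable (Spec_find1 arr x out) := by unfold Spec_find1; infer_instance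

-- ===== CLAIM (what is proved, stated in full; the proofs are below) =====
def Claim_equal_find1 : Prop := ∀ (arr : List Int) (x : Int), Dom_find1 arr x → Spec_find1 arr x (find1 arr x)

-- ===== LEMMAS AND PROOFS =====

-- the fold of B, named for the proofs
def lastIdx (arr : List Int) (x : Int) : Int :=
  (PySem.List.enumerate arr).foldl (fun acc p => if p.2 = x then p.1 else acc) (-1)

theorem lastIdx_append_singleton (l : List Int) (a x : Int) :
    lastIdx (l ++ [a]) x = if a = x then (l.length : Int) else lastIdx l x := by
  simp [lastIdx, PySem.List.enumerate_append, PySem.List.enumerate_cons]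

theorem lastIdx_bounds (l : List Int) (x : Int) :
    -1 ≤ lastIdx l x ∧ lastIdx l x < l.length := by
  induction l using List.reverseRecOn with
  | nil => simp [lastIdx, PySem.List.enumerate_nil]
  | append_singleton l a ih =>
    rw [lastIdx_append_singleton]
    split <;> simp <;> omega

theorem find1_alt_eq (arr : List Int) (x : Int) :
    find1_alt arr x =
      if lastIdx arr x = -1 then -1 else (arr.length : Int) - lastIdx arr x := rfl

theorem find1_append_singleton (l : List Int) (a x : Int) :
    find1 (l ++ [a]) x =
      if a = x then 1
      else if find1 l x = -1 then -1 else find1 l x + 1 := by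
  rw [find1]
  simp [PySem.List.pyGetD_neg_one_append_singleton, PySem.List.slice_to_neg_one]

theorem find1_eq_alt (arr : List Int) (x : Int) : find1 arr x = find1_alt arr x := by
  induction arr using List.reverseRecOn with
  | nil => rw [find1]; simp [find1_alt_eq, lastIdx, PySem.List.enumerate_nil]
  | append_singleton l a ih =>
    have hb := lastIdx_bounds l x
    rw [find1_append_singleton, find1_alt_eq, lastIdx_append_singleton, ih, find1_alt_eq]
    simp only [List.length_append, List.length_cons, List.length_nil]
    split_ifs <;> push_cast <;> omega

-- ===== VERDICT (by name: the statement is the Claim_ definition above) =====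
theorem find1_spec : Claim_equal_find1 := by
  intro arr x _
  unfold Spec_find1
  exact find1_eq_alt arr x
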